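-- pv_equiv track=rewrite | github.com/JFan5/Safety-gen | rovers/extract_safety_ltl.py | parse_typed_objects_from_objects_block
-- ===== SOURCE A (Python) =====
-- from typing import Dict, List, Optional, Tuple
--
-- def parse_typed_objects_from_objects_block(objects_block: str) -> Dict[str, List[str]]:
--     """Parse typed objects from the (:objects ...) block.
--
--     Expected PDDL style like:
--       a b c - rover
--       w1 w2 - waypoint
--       ...
--
--     Returns: {type_name: [obj1, obj2, ...]}
--     """
--     tokens = objects_block.replace("\n", " ").split()
--     typed: Dict[str, List[str]] = {}
--     cur_objs: List[str] = []
--     i = 0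
--     while i < len(tokens):
--         if tokens[i] == "-" and i + 1 < len(tokens):
--             t = tokens[i + 1].lower()
--             typed.setdefault(t, []).extend(cur_objs)
--             cur_objs = []
--             i += 2
--             continue
--         # regular identifier
--         cur_objs.append(tokens[i])
--         i += 1
--     return typed
-- ===== SOURCE B (Python) =====
-- def parse_typed_objects_from_objects_block(objects_block: str):
--     """Jump-based parse: repeatedly locate the next '-' separator with
--     list.index and slice the object group off, instead of scanning token
--     by token with an index and lookahead."""
--     typed = {}
--     rest = objects_block.split()
--     while "-" in rest:
--         j = rest.index("-")
--         if j + 1 >= len(rest):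
--             break
--         t = rest[j + 1].lower()
--         typed.setdefault(t, []).extend(rest[:j])
--         rest = rest[j + 2:]
--     return typed
-- ===== Notes on version B (the rewrite author's own statement) =====
-- stated objective: alternative
-- what changed: A scans tokens one by one with an index and a lookahead at tokens[i+1]; B repeatedly jumps to the next dash separator with list.index, flushes the slice before it into the dict under the following type word, and continues on the slice after it.
import Mathlib
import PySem

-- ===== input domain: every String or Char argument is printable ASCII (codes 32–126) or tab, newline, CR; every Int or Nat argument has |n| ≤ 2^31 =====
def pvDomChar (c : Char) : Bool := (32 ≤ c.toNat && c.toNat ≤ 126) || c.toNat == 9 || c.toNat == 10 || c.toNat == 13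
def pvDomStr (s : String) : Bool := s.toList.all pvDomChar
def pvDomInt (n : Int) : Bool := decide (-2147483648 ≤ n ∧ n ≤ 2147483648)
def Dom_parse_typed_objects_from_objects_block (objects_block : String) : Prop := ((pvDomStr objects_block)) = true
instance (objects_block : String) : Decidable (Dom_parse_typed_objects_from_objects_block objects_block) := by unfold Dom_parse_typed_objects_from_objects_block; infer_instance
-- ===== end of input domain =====

-- B replaces A's token-by-token index scan with lookahead by a jump-based loop that
-- repeatedly finds the next "-" via list.index and slices the group off (objective: alternative).


-- ===== PORT A =====
-- A's while loop over `tokens` with index i: at a "-" with a successor, flush cur_objs into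
-- typed[tokens[i+1].lower()] (setdefault+extend = Dict.modify with default []) and skip 2;
-- otherwise append the token and advance.  `rest.headD ""` is tokens[i+1], guarded by rest ≠ [].
def pyLoopA (typed : PySem.Dict String (List String)) (cur : List String) :
    List String → PySem.Dict String (List String)
  | [] => typed
  | t :: rest =>
    if t = "-" ∧ rest ≠ [] then
      pyLoopA (typed.modify (PySem.Str.lower (rest.headD "")) [] (· ++ cur)) [] rest.tail
    else
      pyLoopA typed (cur ++ [t]) rest
  termination_by toks => toks.length
  decreasing_by
  all_goals simp [List.length_tail]

def parse_typed_objects_from_objects_block (objects_block : String) : List (String × List String) :=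
  (pyLoopA PySem.Dict.empty []
    (PySem.Str.split₀ (PySem.Str.replace objects_block "\n" " "))).items

-- ===== PORT B =====
-- Source B's while loop: while "-" in rest, j = rest.index("-"); if no successor break; flush
-- rest[:j] (= rest.take j, j ≥ 0) into typed[rest[j+1].lower()] and continue on rest[j+2:]
-- (= rest.drop (j+2)).  rest.getD (j+1) "" is rest[j+1], exact since j+1 < rest.length is checked.
def pyLoopB (typed : PySem.Dict String (List String)) (rest : List String) :
    PySem.Dict String (List String) :=
  if "-" ∈ rest then
    match PySem.List.index? rest "-" with
    | none => typed   -- unreachable: "-" ∈ rest guarantees index? = some _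
    | some j =>
      if rest.length ≤ j + 1 then typed
      else
        pyLoopB (typed.modify (PySem.Str.lower (rest.getD (j + 1) "")) [] (· ++ rest.take j))
          (rest.drop (j + 2))
  else typed
  termination_by rest.length
  decreasing_by simp [List.length_drop]; omega

def parse_typed_objects_from_objects_block_alt (objects_block : String) : List (String × List String) :=
  (pyLoopB PySem.Dict.empty (PySem.Str.split₀ objects_block)).items

-- ===== PRECONDITION & SPEC =====
def Spec_parse_typed_objects_from_objects_block (objects_block : String) (out : List (String × List String)) : Prop := out = parse_typed_objects_from_objects_block_alt objects_block
instance (objects_block : String) (out : List (String × List String)) : Decidable (Spec_parse_typed_objects_from_objects_block objects_block out) := by unfold Spec_parse_typed_objects_from_objects_block; infer_instance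

-- ===== CLAIM (what is proved, stated in full; the proofs are below) =====
def Claim_equal_parse_typed_objects_from_objects_block : Prop := ∀ (objects_block : String), Dom_parse_typed_objects_from_objects_block objects_block → Spec_parse_typed_objects_from_objects_block objects_block (parse_typed_objects_from_objects_block objects_block)

-- ===== LEMMAS AND PROOFS =====

-- A's replace("\n", " ") is invisible to split(): '\n' and ' ' are both whitespace.
def pvNl2Sp (c : Char) : Char := if c = '\n' then ' ' else c

theorem pv_replace_go_eq (fuel : Nat) : ∀ (l acc : List Char), l.length ≤ fuel →
    PySem.Chars.replace.go ['\n'] [' '] fuel l acc = acc.reverse ++ l.map pvNl2Sp := by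
  induction fuel with
  | zero =>
    intro l acc h
    have : l = [] := List.eq_nil_of_length_eq_zero (by omega)
    subst this; simp [PySem.Chars.replace.go]
  | succ n ih =>
    intro l acc h
    match l with
    | [] => simp [PySem.Chars.replace.go]
    | c :: t =>
      by_cases hc : c = '\n'
      · subst hc
        have hp : List.isPrefixOf ['\n'] ('\n' :: t) = true := by simp [List.isPrefixOf]
        rw [PySem.Chars.replace.go, if_pos hp]
        rw [show List.drop (['\n'].length) ('\n' :: t) = t from rfl,
          show [' '].reverse ++ acc = ' ' :: acc from rfl]
        rw [ih t (' ' :: acc) (by simp at h; omega)]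
        simp [pvNl2Sp]
      · have hp : List.isPrefixOf ['\n'] (c :: t) = false := by
          simp [List.isPrefixOf]; exact fun he => (hc he.symm).elim
        rw [PySem.Chars.replace.go, if_neg (by simp [hp])]
        rw [ih t (c :: acc) (by simp at h; omega)]
        simp [pvNl2Sp, hc]

theorem pv_replace_eq_map (cs : List Char) :
    PySem.Chars.replace cs ['\n'] [' '] = cs.map pvNl2Sp := by
  rw [PySem.Chars.replace]
  split
  · next hemp => simp at hemp
  · exact pv_replace_go_eq cs.length cs [] le_rfl

theorem pv_split₀_go_map (l : List Char) : ∀ (cur : List Char) (acc : List (List Char)),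
    PySem.Chars.split₀.go (l.map pvNl2Sp) cur acc = PySem.Chars.split₀.go l cur acc := by
  induction l with
  | nil => intro cur acc; rfl
  | cons c t ih =>
    intro cur acc
    by_cases hc : c = '\n'
    · subst hc
      rw [List.map_cons, show pvNl2Sp '\n' = ' ' from rfl]
      rw [PySem.Chars.split₀.go, PySem.Chars.split₀.go]
      have hs : PySem.Chars.isspace ' ' = true := by decide
      have hn : PySem.Chars.isspace '\n' = true := by decide
      rw [if_pos hs, if_pos hn]
      split <;> rw [ih]
    · have hne : pvNl2Sp c = c := by simp [pvNl2Sp, hc]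
      rw [List.map_cons, hne]
      rw [PySem.Chars.split₀.go, PySem.Chars.split₀.go]
      by_cases hs : PySem.Chars.isspace c = true
      · rw [if_pos hs, if_pos hs]; split <;> rw [ih]
      · rw [if_neg hs, if_neg hs]; rw [ih]

theorem pv_tokens_eq (s : String) :
    PySem.Str.split₀ (PySem.Str.replace s "\n" " ") = PySem.Str.split₀ s := by
  unfold PySem.Str.split₀
  congr 1
  rw [PySem.Str.toList_replace]
  show PySem.Chars.split₀ (PySem.Chars.replace s.toList ['\n'] [' ']) = _
  rw [pv_replace_eq_map]
  unfold PySem.Chars.split₀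
  exact pv_split₀_go_map s.toList [] []

theorem pyLoopA_nil (typed : PySem.Dict String (List String)) (cur : List String) :
    pyLoopA typed cur [] = typed := by
  rw [pyLoopA.eq_def]

theorem pyLoopA_cons (typed : PySem.Dict String (List String)) (cur : List String)
    (t : String) (rest : List String) :
    pyLoopA typed cur (t :: rest) =
      if t = "-" ∧ rest ≠ [] then
        pyLoopA (typed.modify (PySem.Str.lower (rest.headD "")) [] (· ++ cur)) [] rest.tail
      else pyLoopA typed (cur ++ [t]) rest := by
  rw [pyLoopA.eq_def]

-- Core equivalence: A's scan with accumulator cur equals B's jump loop on cur ++ toks,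
-- as long as cur holds no "-" (which A's accumulation guarantees).
theorem pv_loop_eq (toks : List String) (typed : PySem.Dict String (List String))
    (cur : List String) (hcur : "-" ∉ cur) :
    pyLoopA typed cur toks = pyLoopB typed (cur ++ toks) := by
  match toks with
  | [] =>
    rw [pyLoopA_nil, pyLoopB.eq_def]
    simp [hcur]
  | t :: rest =>
    by_cases ht : t = "-"
    · subst ht
      match rest with
      | [] =>
        have hcond : ¬(("-" : String) = "-" ∧ ([] : List String) ≠ []) := by simp
        rw [pyLoopA_cons, if_neg hcond, pyLoopA_nil, pyLoopB.eq_def]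
        have hmem : "-" ∈ cur ++ ["-"] := by simp
        rw [if_pos hmem, PySem.List.index?_append_singleton_self cur "-" hcur]
        simp
      | ty :: rest' =>
        rw [pyLoopA_cons, if_pos (⟨rfl, by simp⟩ : ("-" : String) = "-" ∧ (ty :: rest') ≠ [])]
        simp only [List.headD_cons, List.tail_cons]
        have hidx : PySem.List.index? (cur ++ "-" :: ty :: rest') "-" = some cur.length :=
          (PySem.List.index?_eq_some_iff _ _ _).mpr ⟨cur, ty :: rest', rfl, rfl, hcur⟩
        have hlen : ¬ (cur ++ "-" :: ty :: rest').length ≤ cur.length + 1 := by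
          simp only [List.length_append, List.length_cons]; omega
        have hget : (cur ++ "-" :: ty :: rest').getD (cur.length + 1) "" = ty := by
          rw [List.getD_eq_getElem?_getD, List.getElem?_append_right (by omega)]
          simp
        have htake : (cur ++ "-" :: ty :: rest').take cur.length = cur := List.take_left
        have hdrop : (cur ++ "-" :: ty :: rest').drop (cur.length + 2) = rest' := by
          rw [show cur.length + 2 = (cur ++ ["-", ty]).length by simp,
            show cur ++ "-" :: ty :: rest' = (cur ++ ["-", ty]) ++ rest' by simp,
            List.drop_left]
        rw [pyLoopB.eq_def, if_pos (by simp : "-" ∈ cur ++ "-" :: ty :: rest'), hidx]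
        show pyLoopA _ [] rest' = if (cur ++ "-" :: ty :: rest').length ≤ cur.length + 1 then
          typed else pyLoopB (typed.modify (PySem.Str.lower
            ((cur ++ "-" :: ty :: rest').getD (cur.length + 1) "")) []
            (· ++ (cur ++ "-" :: ty :: rest').take cur.length))
          ((cur ++ "-" :: ty :: rest').drop (cur.length + 2))
        rw [if_neg hlen, hget, htake, hdrop]
        simpa using pv_loop_eq rest' (typed.modify (PySem.Str.lower ty) [] (· ++ cur)) []
          (by simp)
    · have hcond : ¬(t = "-" ∧ rest ≠ []) := fun h => ht h.1
      rw [pyLoopA_cons, if_neg hcond]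
      have hcur' : "-" ∉ cur ++ [t] := by
        simp [hcur]; exact fun h => ht h.symm
      simpa using pv_loop_eq rest typed (cur ++ [t]) hcur'
  termination_by toks.length
  decreasing_by
  all_goals simp

-- ===== VERDICT (by name: the statement is the Claim_ definition above) =====
theorem parse_typed_objects_from_objects_block_spec : Claim_equal_parse_typed_objects_from_objects_block := by
  intro objects_block _
  show parse_typed_objects_from_objects_block objects_block = _
  unfold parse_typed_objects_from_objects_block parse_typed_objects_from_objects_block_alt
  rw [pv_tokens_eq]
  rw [pv_loop_eq (PySem.Str.split₀ objects_block) PySem.Dict.empty [] (by simp)]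
  simp
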